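-- pv_equiv track=rewrite | github.com/thiagogq-dev/TCC_TESTE | run_depth_analyses.py | trace_path
-- ===== SOURCE A (Python) =====
-- def trace_path(fix_to_bic, start_commit, path=None, all_paths=None, visited=None):
--     if path is None:
--         path = [start_commit]
--     if all_paths is None:
--         all_paths = []
--     if visited is None:
--         visited = set()
--
--     if start_commit in visited:
--         return all_paths
--     visited.add(start_commit)
--
--     bics = fix_to_bic.get(start_commit, [])
--     if not bics:
--         all_paths.append(path)
--         return all_paths
--
--     for bic in bics:
--         trace_path(fix_to_bic, bic, path + [bic], all_paths, visited)
--
--     return all_paths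
-- ===== SOURCE B (Python) =====
-- def trace_path(fix_to_bic, start_commit, path=None, all_paths=None, visited=None):
--     if path is None:
--         path = [start_commit]
--     if all_paths is None:
--         all_paths = []
--     if visited is None:
--         visited = set()
--
--     stack = [(start_commit, path)]
--     while stack:
--         commit, cur = stack.pop()
--         if commit in visited:
--             continue
--         visited.add(commit)
--         bics = fix_to_bic.get(commit, [])
--         if bics:
--             # push in reverse so pop order equals A's left-to-right recursion order
--             for b in reversed(bics):
--                 stack.append((b, cur + [b]))
--         else:
--             all_paths.append(cur)
--     return all_paths
-- ===== Notes on version B (the rewrite author's own statement) =====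
-- stated objective: alternative
-- what changed: Replaces the recursive DFS (recursion through a shared visited set and all_paths accumulator) with an iterative DFS over an explicit stack of (commit, path) pairs, pushing children in reverse so pop order matches A's left-to-right emission order.
import Mathlib
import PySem

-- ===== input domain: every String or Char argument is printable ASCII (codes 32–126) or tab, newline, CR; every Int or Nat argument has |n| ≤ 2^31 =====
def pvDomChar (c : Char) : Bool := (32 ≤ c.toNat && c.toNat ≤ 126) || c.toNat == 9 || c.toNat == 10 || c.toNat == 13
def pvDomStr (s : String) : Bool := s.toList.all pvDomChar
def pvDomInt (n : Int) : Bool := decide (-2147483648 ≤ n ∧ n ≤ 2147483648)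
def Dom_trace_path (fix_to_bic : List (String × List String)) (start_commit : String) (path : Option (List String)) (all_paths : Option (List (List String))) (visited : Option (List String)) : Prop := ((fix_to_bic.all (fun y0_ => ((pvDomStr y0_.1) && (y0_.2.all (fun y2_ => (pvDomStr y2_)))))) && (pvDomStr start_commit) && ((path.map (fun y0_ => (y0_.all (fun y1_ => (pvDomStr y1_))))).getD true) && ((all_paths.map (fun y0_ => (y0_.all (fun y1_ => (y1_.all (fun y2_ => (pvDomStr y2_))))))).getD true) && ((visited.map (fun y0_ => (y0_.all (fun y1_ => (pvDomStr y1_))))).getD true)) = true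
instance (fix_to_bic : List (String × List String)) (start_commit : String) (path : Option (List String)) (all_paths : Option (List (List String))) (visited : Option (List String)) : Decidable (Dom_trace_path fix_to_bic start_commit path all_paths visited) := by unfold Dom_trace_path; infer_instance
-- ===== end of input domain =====

-- B replaces A's recursive DFS by an iterative DFS over an explicit stack of (commit, path) pairs
-- (same return value; in Python A and B both mutate the caller's all_paths/visited — the equivalence
-- proved here is about the RETURN value only).

-- ===== PORT A =====
-- Termination measure of A's recursion: number of dict keys not yet in the visited set.
def pvMu (d : PySem.Dict String (List String)) (vis : PySem.Set String) : Nat :=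
  ((PySem.Dict.keys d).filter (fun k => !(PySem.Set.contains vis k))).length

-- helper facts A's port cites in its decreasing_by blocks
theorem pv_filter_len_mono {α : Type} (l : List α) (p q : α → Bool)
    (h : ∀ a ∈ l, p a = true → q a = true) :
    (l.filter p).length ≤ (l.filter q).length := by
  induction l with
  | nil => simp
  | cons a l ih =>
    have ih' := ih (fun a ha => h a (List.mem_cons_of_mem _ ha))
    by_cases hp : p a = true
    · simp only [List.filter_cons, hp, h a List.mem_cons_self hp, if_true, List.length_cons]
      omega
    · rw [Bool.not_eq_true] at hp
      cases hq : q a <;>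
        simp only [List.filter_cons, hp, hq, Bool.false_eq_true, if_false, if_true,
          List.length_cons] <;> omega

theorem pv_filter_len_strict {α : Type} (l : List α) (p q : α → Bool)
    (hmono : ∀ a ∈ l, p a = true → q a = true) (c : α) (hc : c ∈ l)
    (hp : p c = false) (hq : q c = true) :
    (l.filter p).length < (l.filter q).length := by
  induction l with
  | nil => cases hc
  | cons a l ih =>
    have hmono' := fun a ha => hmono a (List.mem_cons_of_mem _ ha)
    rcases List.mem_cons.1 hc with rfl | hal
    · have := pv_filter_len_mono l p q hmono'
      simp only [List.filter_cons, hp, hq, Bool.false_eq_true, if_false, if_true,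
        List.length_cons]
      omega
    · have ih' := ih hmono' hal
      by_cases hpa : p a = true
      · simp only [List.filter_cons, hpa, hmono a List.mem_cons_self hpa, if_true,
          List.length_cons]
        omega
      · rw [Bool.not_eq_true] at hpa
        cases hqa : q a <;>
          simp only [List.filter_cons, hpa, hqa, Bool.false_eq_true, if_false, if_true,
            List.length_cons] <;> omega

theorem pvMu_le_of_subset (d : PySem.Dict String (List String)) (vis vis' : PySem.Set String)
    (h : ∀ x ∈ vis, x ∈ vis') : pvMu d vis' ≤ pvMu d vis := by
  apply pv_filter_len_mono
  intro a _ ha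
  rw [Bool.not_eq_true'] at ha ⊢
  cases hc : PySem.Set.contains vis a with
  | false => rfl
  | true =>
    have hmem : PySem.Set.contains vis' a = true :=
      (PySem.Set.contains_iff _ _).2 (h a ((PySem.Set.contains_iff _ _).1 hc))
    rw [hmem] at ha
    exact absurd ha (by simp)

theorem pvMu_add_lt (d : PySem.Dict String (List String)) (vis : PySem.Set String) (c : String)
    (hk : c ∈ PySem.Dict.keys d) (hc : c ∉ vis) :
    pvMu d (PySem.Set.add vis c) < pvMu d vis := by
  refine pv_filter_len_strict _ _ _ ?_ c hk ?_ ?_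
  · intro a _ ha
    rw [Bool.not_eq_true'] at ha ⊢
    cases hct : PySem.Set.contains vis a with
    | false => rfl
    | true =>
      have hmem : PySem.Set.contains (PySem.Set.add vis c) a = true :=
        (PySem.Set.contains_iff _ _).2 ((PySem.Set.mem_add _ _ _).2
          (Or.inl ((PySem.Set.contains_iff _ _).1 hct)))
      rw [hmem] at ha
      exact absurd ha (by simp)
  · have hmem : PySem.Set.contains (PySem.Set.add vis c) c = true :=
      (PySem.Set.contains_iff _ _).2 ((PySem.Set.mem_add _ _ _).2 (Or.inr rfl))
    rw [hmem]
    rfl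
  · cases hct : PySem.Set.contains vis c with
    | false => rfl
    | true => exact absurd ((PySem.Set.contains_iff _ _).1 hct) hc

theorem pv_mem_keys_of_getD_ne (d : PySem.Dict String (List String)) (c : String)
    (h : PySem.Dict.getD d c [] ≠ []) : c ∈ PySem.Dict.keys d := by
  by_contra hk
  have hn : PySem.Dict.get? d c = none := (PySem.Dict.get?_eq_none_iff_not_mem_keys _ _).2 hk
  exact h (by rw [PySem.Dict.getD_eq_get?_getD, hn]; rfl)

theorem pvLexCall (m k : Nat) :
    Prod.Lex (· < ·) (· < ·) ((m, 0) : Nat × Nat) (m, k + 1) :=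
  Prod.Lex.right _ (Nat.succ_pos k)

theorem pvLexTail {m m' : Nat} {b : String} {bs : List String} (h : m' ≤ m) :
    Prod.Lex (· < ·) (· < ·) ((m', bs.length + 1) : Nat × Nat) (m, (b :: bs).length + 1) := by
  rcases lt_or_eq_of_le h with hlt | heq
  · exact Prod.Lex.left _ _ hlt
  · rw [heq]; exact Prod.Lex.right _ (by simp only [List.length_cons]; omega)

mutual
-- literal port of A's recursive body after the None-defaults; the subtype records the
-- invariant "visited only grows", which the termination measure needs
def pvGoA (d : PySem.Dict String (List String)) (start_commit : String) (path : List String)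
    (all_paths : List (List String)) (visited : PySem.Set String) :
    {r : List (List String) × PySem.Set String // ∀ x ∈ visited, x ∈ r.2} :=
  if h : PySem.Set.contains visited start_commit then
    ⟨(all_paths, visited), fun _ hx => hx⟩
  else
    -- visited.add(start_commit); bics = fix_to_bic.get(start_commit, [])
    if hb : PySem.Dict.getD d start_commit [] = [] then
      ⟨(all_paths ++ [path], PySem.Set.add visited start_commit),
        fun x hx => (PySem.Set.mem_add _ _ _).2 (Or.inl hx)⟩
    else
      -- for bic in bics: trace_path(fix_to_bic, bic, path + [bic], all_paths, visited)
      let r := pvGoAList d (PySem.Dict.getD d start_commit []) path all_paths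
                 (PySem.Set.add visited start_commit)
      ⟨r.1, fun x hx => r.2 x ((PySem.Set.mem_add _ _ _).2 (Or.inl hx))⟩
termination_by (pvMu d visited, 0)
decreasing_by
  exact Prod.Lex.left _ _ (pvMu_add_lt d visited start_commit
    (pv_mem_keys_of_getD_ne d start_commit hb)
    (fun hm => h ((PySem.Set.contains_iff _ _).2 hm)))

def pvGoAList (d : PySem.Dict String (List String)) (bics : List String) (path : List String)
    (all_paths : List (List String)) (visited : PySem.Set String) :
    {r : List (List String) × PySem.Set String // ∀ x ∈ visited, x ∈ r.2} :=
  match bics with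
  | [] => ⟨(all_paths, visited), fun _ hx => hx⟩
  | b :: bs =>
    let r := pvGoA d b (path ++ [b]) all_paths visited
    let r2 := pvGoAList d bs path r.1.1 r.1.2
    ⟨r2.1, fun x hx => r2.2 x (r.2 x hx)⟩
termination_by (pvMu d visited, bics.length + 1)
decreasing_by
  · exact pvLexCall (pvMu d visited) ((b :: bs).length)
  · exact pvLexTail (pvMu_le_of_subset d visited r.1.2 r.2)
end

def trace_path (fix_to_bic : List (String × List String)) (start_commit : String) (path : Option (List String)) (all_paths : Option (List (List String))) (visited : Option (List String)) : List (List String) :=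
  -- the three None-defaults, then the recursive body
  (pvGoA (PySem.Dict.mk fix_to_bic) start_commit (path.getD [start_commit])
    (all_paths.getD []) (PySem.Set.ofList (visited.getD []))).1.1

-- ===== PORT B =====
-- Source B's while-loop over a stack, pop from the end; here the head of `frames` is the top of the
-- stack, so Source B's "push children reversed, pop last" is exactly "prepend children in order".
-- Termination is a single Nat measure: (#keys not yet seen) * fan-out cap + stack length.

-- number of graph keys not yet in `seen`
def pvSeenGap (g : PySem.Dict String (List String)) (seen : PySem.Set String) : Nat :=
  (PySem.Dict.keys g).countP (fun k => !(PySem.Set.contains seen k))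

-- strict upper bound on the length of any adjacency list of g
def pvFanCap (g : PySem.Dict String (List String)) : Nat :=
  g.items.foldr (fun pr n => pr.2.length + n) 1

theorem pvSeenGap_eq_mu (g : PySem.Dict String (List String)) (s : PySem.Set String) :
    pvSeenGap g s = pvMu g s := by
  unfold pvSeenGap pvMu; rw [List.countP_eq_length_filter]

theorem pvSeenGap_mono (g : PySem.Dict String (List String)) (s t : PySem.Set String)
    (h : ∀ x ∈ s, x ∈ t) : pvSeenGap g t ≤ pvSeenGap g s := by
  rw [pvSeenGap_eq_mu, pvSeenGap_eq_mu]; exact pvMu_le_of_subset g s t h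

theorem pvSeenGap_add_lt (g : PySem.Dict String (List String)) (seen : PySem.Set String)
    (c : String) (hk : c ∈ PySem.Dict.keys g) (hn : PySem.Set.contains seen c = false) :
    pvSeenGap g (PySem.Set.add seen c) < pvSeenGap g seen := by
  rw [pvSeenGap_eq_mu, pvSeenGap_eq_mu]
  exact pvMu_add_lt g seen c hk
    (fun hm => by rw [(PySem.Set.contains_iff _ _).2 hm] at hn; cases hn)

theorem pv_fan_lt_cap (g : PySem.Dict String (List String)) (c : String) (v : List String)
    (h : PySem.Dict.get? g c = some v) : v.length < pvFanCap g := by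
  have hm : (c, v) ∈ g.items := PySem.Dict.mem_items_of_get?_eq_some _ h
  unfold pvFanCap
  generalize g.items = l at hm
  induction l with
  | nil => cases hm
  | cons q l ih =>
    have hge : 1 ≤ l.foldr (fun pr n => pr.2.length + n) 1 := by
      clear ih hm
      induction l with
      | nil => simp
      | cons r l ih2 => simp only [List.foldr_cons]; omega
    rcases List.mem_cons.1 hm with rfl | hml
    · simp only [List.foldr_cons]; omega
    · have := ih hml
      simp only [List.foldr_cons]; omega

theorem pv_get?_of_getD_cons (g : PySem.Dict String (List String)) (c b : String)
    (bs : List String) (h : PySem.Dict.getD g c [] = b :: bs) :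
    PySem.Dict.get? g c = some (b :: bs) := by
  rw [PySem.Dict.getD_eq_get?_getD] at h
  cases hq : PySem.Dict.get? g c with
  | none => rw [hq] at h; simp at h
  | some v => rw [hq] at h; simp only [Option.getD_some] at h; exact congrArg some h

theorem pv_mem_keys_of_get?_some (g : PySem.Dict String (List String)) (c : String)
    (v : List String) (h : PySem.Dict.get? g c = some v) : c ∈ PySem.Dict.keys g := by
  by_contra hk
  rw [(PySem.Dict.get?_eq_none_iff_not_mem_keys _ _).2 hk] at h
  cases h

-- facts for the combined measure, proved once so the decreasing proofs are bare applications
theorem pvContainsFalse (s : PySem.Set String) (c : String) (h : ¬ PySem.Set.contains s c = true) :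
    PySem.Set.contains s c = false := by
  cases h2 : PySem.Set.contains s c
  · rfl
  · exact absurd h2 h

theorem pvDecSkip (x : String × List String) (rest : List (String × List String)) (m : Nat) :
    m + rest.length < m + (x :: rest).length := by
  simp only [List.length_cons]; omega

theorem pvDecEmit (x : String × List String) (rest : List (String × List String))
    (cap g' g : Nat) (h : g' ≤ g) :
    g' * cap + rest.length < g * cap + (x :: rest).length := by
  have := Nat.mul_le_mul_right cap h
  simp only [List.length_cons]; omega

theorem pvDecExpand (f : String → String × List String) (b : String) (bs : List String)
    (x : String × List String) (rest : List (String × List String))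
    (cap g' g : Nat) (h1 : g' < g) (h2 : (b :: bs).length < cap) :
    g' * cap + ((b :: bs).map f ++ rest).length < g * cap + (x :: rest).length := by
  have h3 : g' * cap + cap ≤ g * cap := by
    have := Nat.mul_le_mul_right cap (Nat.succ_le_of_lt h1)
    rw [Nat.succ_mul] at this
    omega
  simp only [List.length_append, List.length_map, List.length_cons] at *
  omega

-- the while-loop of Source B: one iteration per popped frame
def pvDfsStack (g : PySem.Dict String (List String)) (frames : List (String × List String))
    (acc : List (List String)) (seen : PySem.Set String) : List (List String) :=
  match frames with
  | [] => acc
  | (commit, cur) :: rest =>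
    if hs : PySem.Set.contains seen commit then
      pvDfsStack g rest acc seen
    else
      match hb : PySem.Dict.getD g commit [] with
      | [] => pvDfsStack g rest (acc ++ [cur]) (PySem.Set.add seen commit)
      | b :: bs =>
        pvDfsStack g (((b :: bs).map (fun x => (x, cur ++ [x]))) ++ rest) acc
          (PySem.Set.add seen commit)
termination_by pvSeenGap g seen * pvFanCap g + frames.length
decreasing_by
  · exact pvDecSkip (commit, cur) rest (pvSeenGap g seen * pvFanCap g)
  · exact pvDecEmit (commit, cur) rest (pvFanCap g) _ _
      (pvSeenGap_mono g seen (PySem.Set.add seen commit)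
        (fun x hx => (PySem.Set.mem_add _ _ _).2 (Or.inl hx)))
  · exact pvDecExpand (fun x => (x, cur ++ [x])) b bs (commit, cur) rest (pvFanCap g) _ _
      (pvSeenGap_add_lt g seen commit
        (pv_mem_keys_of_get?_some g commit _ (pv_get?_of_getD_cons g commit b bs hb))
        (pvContainsFalse seen commit hs))
      (pv_fan_lt_cap g commit _ (pv_get?_of_getD_cons g commit b bs hb))

def trace_path_alt (fix_to_bic : List (String × List String)) (start_commit : String) (path : Option (List String)) (all_paths : Option (List (List String))) (visited : Option (List String)) : List (List String) :=
  pvDfsStack (PySem.Dict.mk fix_to_bic)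
    [(start_commit, match path with | some ps => ps | none => [start_commit])]
    (match all_paths with | some aps => aps | none => [])
    (match visited with | some vs => PySem.Set.ofList vs | none => PySem.Set.empty)

-- ===== PRECONDITION & SPEC =====
def Spec_trace_path (fix_to_bic : List (String × List String)) (start_commit : String) (path : Option (List String)) (all_paths : Option (List (List String))) (visited : Option (List String)) (out : List (List String)) : Prop := out = trace_path_alt fix_to_bic start_commit path all_paths visited
instance (fix_to_bic : List (String × List String)) (start_commit : String) (path : Option (List String)) (all_paths : Option (List (List String))) (visited : Option (List String)) (out : List (List String)) : Decidable (Spec_trace_path fix_to_bic start_commit path all_paths visited out) := by unfold Spec_trace_path; infer_instance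

-- ===== CLAIM (what is proved, stated in full; the proofs are below) =====
def Claim_equal_trace_path : Prop := ∀ (fix_to_bic : List (String × List String)) (start_commit : String) (path : Option (List String)) (all_paths : Option (List (List String))) (visited : Option (List String)), Dom_trace_path fix_to_bic start_commit path all_paths visited → Spec_trace_path fix_to_bic start_commit path all_paths visited (trace_path fix_to_bic start_commit path all_paths visited)

-- ===== LEMMAS AND PROOFS =====

-- step lemmas for B's stack loop
theorem pvDfsStack_nil (g : PySem.Dict String (List String)) (acc : List (List String))
    (seen : PySem.Set String) : pvDfsStack g [] acc seen = acc := by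
  rw [pvDfsStack.eq_def]

theorem pvDfsStack_skip (g : PySem.Dict String (List String)) (commit : String)
    (cur : List String) (rest : List (String × List String)) (acc : List (List String))
    (seen : PySem.Set String) (h : PySem.Set.contains seen commit = true) :
    pvDfsStack g ((commit, cur) :: rest) acc seen = pvDfsStack g rest acc seen := by
  conv_lhs => rw [pvDfsStack.eq_def]
  simp only [dif_pos h]

theorem pvDfsStack_emit (g : PySem.Dict String (List String)) (commit : String)
    (cur : List String) (rest : List (String × List String)) (acc : List (List String))
    (seen : PySem.Set String) (h : PySem.Set.contains seen commit = false)
    (hb : PySem.Dict.getD g commit [] = []) :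
    pvDfsStack g ((commit, cur) :: rest) acc seen
      = pvDfsStack g rest (acc ++ [cur]) (PySem.Set.add seen commit) := by
  conv_lhs => rw [pvDfsStack.eq_def]
  simp only [dif_neg (show ¬ (PySem.Set.contains seen commit = true) by
    rw [h]; exact Bool.false_ne_true)]
  split
  · rfl
  · rename_i b' bs' heq
    rw [hb] at heq
    cases heq

theorem pvDfsStack_expand (g : PySem.Dict String (List String)) (commit : String)
    (cur : List String) (rest : List (String × List String)) (acc : List (List String))
    (seen : PySem.Set String) (h : PySem.Set.contains seen commit = false)
    (b : String) (bs : List String) (hb : PySem.Dict.getD g commit [] = b :: bs) :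
    pvDfsStack g ((commit, cur) :: rest) acc seen
      = pvDfsStack g (((PySem.Dict.getD g commit []).map (fun x => (x, cur ++ [x]))) ++ rest)
          acc (PySem.Set.add seen commit) := by
  conv_lhs => rw [pvDfsStack.eq_def]
  simp only [dif_neg (show ¬ (PySem.Set.contains seen commit = true) by
    rw [h]; exact Bool.false_ne_true)]
  split
  · rename_i heq
    rw [hb] at heq
    cases heq
  · rename_i b' bs' heq
    rw [heq]

-- value lemmas for A's recursion
theorem pvGoA_visited (d : PySem.Dict String (List String)) (c : String) (p : List String)
    (ap : List (List String)) (vis : PySem.Set String) (h : c ∈ vis) :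
    (pvGoA d c p ap vis).1 = (ap, vis) := by
  rw [pvGoA.eq_def]
  rw [dif_pos ((PySem.Set.contains_iff _ _).2 h)]

theorem pvGoA_leaf (d : PySem.Dict String (List String)) (c : String) (p : List String)
    (ap : List (List String)) (vis : PySem.Set String) (h : c ∉ vis)
    (hb : PySem.Dict.getD d c [] = []) :
    (pvGoA d c p ap vis).1 = (ap ++ [p], PySem.Set.add vis c) := by
  rw [pvGoA.eq_def]
  rw [dif_neg (fun hc => h ((PySem.Set.contains_iff _ _).1 hc))]
  rw [dif_pos hb]

theorem pvGoA_branch (d : PySem.Dict String (List String)) (c : String) (p : List String)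
    (ap : List (List String)) (vis : PySem.Set String) (h : c ∉ vis)
    (hb : PySem.Dict.getD d c [] ≠ []) :
    (pvGoA d c p ap vis).1
      = (pvGoAList d (PySem.Dict.getD d c []) p ap (PySem.Set.add vis c)).1 := by
  rw [pvGoA.eq_def]
  rw [dif_neg (fun hc => h ((PySem.Set.contains_iff _ _).1 hc))]
  rw [dif_neg hb]

theorem pvGoAList_nil (d : PySem.Dict String (List String)) (p : List String)
    (ap : List (List String)) (vis : PySem.Set String) :
    (pvGoAList d [] p ap vis).1 = (ap, vis) := by
  rw [pvGoAList.eq_def]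

theorem pvGoAList_cons (d : PySem.Dict String (List String)) (b : String) (bs : List String)
    (p : List String) (ap : List (List String)) (vis : PySem.Set String) :
    (pvGoAList d (b :: bs) p ap vis).1
      = (pvGoAList d bs p (pvGoA d b (p ++ [b]) ap vis).1.1
          (pvGoA d b (p ++ [b]) ap vis).1.2).1 := by
  rw [pvGoAList.eq_def]

-- simulation, list layer: running B's stack machine on the child segment pushed for bics equals
-- running A's sibling loop first and continuing on the remaining stack
theorem pv_simList (d : PySem.Dict String (List String)) (n : Nat)
    (IH : ∀ (vis : PySem.Set String), pvMu d vis ≤ n →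
      ∀ (c : String) (p : List String) (ap : List (List String)) (rest : List (String × List String)),
        pvDfsStack d ((c, p) :: rest) ap vis
          = pvDfsStack d rest (pvGoA d c p ap vis).1.1 (pvGoA d c p ap vis).1.2) :
    ∀ (bics : List String) (vis : PySem.Set String), pvMu d vis ≤ n →
      ∀ (p : List String) (ap : List (List String)) (rest : List (String × List String)),
        pvDfsStack d ((bics.map (fun b => (b, p ++ [b]))) ++ rest) ap vis
          = pvDfsStack d rest (pvGoAList d bics p ap vis).1.1 (pvGoAList d bics p ap vis).1.2 := by
  intro bics
  induction bics with
  | nil =>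
    intro vis h p ap rest
    rw [List.map_nil, List.nil_append, pvGoAList_nil]
  | cons b bs ih =>
    intro vis h p ap rest
    have step := IH vis h b (p ++ [b]) ap ((bs.map (fun b => (b, p ++ [b]))) ++ rest)
    have hsub := (pvGoA d b (p ++ [b]) ap vis).2
    have hμ : pvMu d (pvGoA d b (p ++ [b]) ap vis).1.2 ≤ n :=
      le_trans (pvMu_le_of_subset d vis _ hsub) h
    have tail := ih (pvGoA d b (p ++ [b]) ap vis).1.2 hμ p
      (pvGoA d b (p ++ [b]) ap vis).1.1 rest
    simp only [List.map_cons, List.cons_append] at step ⊢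
    rw [step, tail, pvGoAList_cons]

-- simulation, main layer: popping one frame equals one recursive call of A
theorem pv_sim (d : PySem.Dict String (List String)) :
    ∀ (n : Nat) (vis : PySem.Set String), pvMu d vis ≤ n →
      ∀ (c : String) (p : List String) (ap : List (List String)) (rest : List (String × List String)),
        pvDfsStack d ((c, p) :: rest) ap vis
          = pvDfsStack d rest (pvGoA d c p ap vis).1.1 (pvGoA d c p ap vis).1.2 := by
  intro n
  induction n using Nat.strong_induction_on with
  | _ n IHn =>
    intro vis h c p ap rest
    by_cases hv : c ∈ vis
    · rw [pvDfsStack_skip d c p rest ap vis ((PySem.Set.contains_iff _ _).2 hv),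
        pvGoA_visited d c p ap vis hv]
    · have hcf : PySem.Set.contains vis c = false := by
        cases h2 : PySem.Set.contains vis c
        · rfl
        · exact absurd ((PySem.Set.contains_iff _ _).1 h2) hv
      rcases hbe : PySem.Dict.getD d c [] with _ | ⟨b, bs⟩
      · rw [pvDfsStack_emit d c p rest ap vis hcf hbe, pvGoA_leaf d c p ap vis hv hbe]
      · have hb : PySem.Dict.getD d c [] ≠ [] := by rw [hbe]; exact List.cons_ne_nil b bs
        have hlt : pvMu d (PySem.Set.add vis c) < pvMu d vis :=
          pvMu_add_lt d vis c (pv_mem_keys_of_getD_ne d c hb) hv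
        have hn1 : 1 ≤ n := by omega
        have hle : pvMu d (PySem.Set.add vis c) ≤ n - 1 := by omega
        have hlist := pv_simList d (n - 1)
          (fun vis' h' => IHn (n - 1) (by omega) vis' h')
          (PySem.Dict.getD d c []) (PySem.Set.add vis c) hle p ap rest
        rw [pvDfsStack_expand d c p rest ap vis hcf b bs hbe, hlist,
          pvGoA_branch d c p ap vis hv hb]

-- ===== VERDICT (by name: the statement is the Claim_ definition above) =====
theorem trace_path_spec : Claim_equal_trace_path := by
  intro fix_to_bic start_commit path all_paths visited _
  unfold Spec_trace_path trace_path trace_path_alt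
  cases path <;> cases all_paths <;> cases visited <;>
    rw [pv_sim (PySem.Dict.mk fix_to_bic) (pvMu (PySem.Dict.mk fix_to_bic) _) _ le_rfl,
      pvDfsStack_nil] <;> rfl
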